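-- pv_equiv track=rewrite | github.com/wangmingjie36-creator/alpha-hive-deploy | feedback_loop.py | _calculate_max_consecutive_losses
-- ===== SOURCE A (Python) =====
-- from typing import Dict, List
--
-- def _calculate_max_consecutive_losses(accuracies: List[int]) -> int:
--     """最大连续亏损次数"""
--     if not accuracies:
--         return 0
--     max_streak = 0
--     current_streak = 0
--     for acc in accuracies:
--         if acc == 0:
--             current_streak += 1
--             max_streak = max(max_streak, current_streak)
--         else:
--             current_streak = 0
--     return max_streak
-- ===== SOURCE B (Python) =====
-- from itertools import groupby
-- from typing import List
--
-- def _calculate_max_consecutive_losses(accuracies: List[int]) -> int: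
--     """最大连续亏损次数"""
--     return max((sum(1 for _ in g) for k, g in groupby(accuracies, key=lambda x: x == 0) if k),
--                default=0)
-- ===== Notes on version B (the rewrite author's own statement) =====
-- stated objective: idiomatic
-- what changed: Replaces the running current/max accumulator loop with an itertools.groupby decomposition: group the list into maximal runs keyed by x == 0, measure the length of each zero-run, and take the max with default=0.
import Mathlib
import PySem

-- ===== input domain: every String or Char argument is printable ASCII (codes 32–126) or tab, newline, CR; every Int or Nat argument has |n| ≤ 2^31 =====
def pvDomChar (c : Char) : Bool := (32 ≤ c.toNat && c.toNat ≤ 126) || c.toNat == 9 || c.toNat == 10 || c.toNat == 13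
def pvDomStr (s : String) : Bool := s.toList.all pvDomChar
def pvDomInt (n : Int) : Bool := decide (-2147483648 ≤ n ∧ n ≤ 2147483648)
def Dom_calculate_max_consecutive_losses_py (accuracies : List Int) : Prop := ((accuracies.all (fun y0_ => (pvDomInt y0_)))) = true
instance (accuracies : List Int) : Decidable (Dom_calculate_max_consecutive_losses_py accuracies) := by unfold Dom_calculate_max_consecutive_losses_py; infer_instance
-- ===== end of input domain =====

-- B replaces A's running current/max accumulator with a groupby decomposition (maximal
-- runs keyed by x == 0, then max of zero-run lengths, default 0); objective: idiomatic.

-- ===== PORT A =====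
def calculate_max_consecutive_losses_py (accuracies : List Int) : Int :=
  if accuracies = [] then 0
  else
    (accuracies.foldl
      (fun (st : Int × Int) acc =>
        if acc = 0 then (max st.1 (st.2 + 1), st.2 + 1) else (st.1, 0))
      (0, 0)).1

-- ===== PORT B =====
-- itertools.groupby(xs, key=lambda x: x == 0), each group materialised as (key, run)
def pyGroupBy : List Int → List (Bool × List Int)
  | [] => []
  | x :: t =>
    (decide (x = 0), x :: t.takeWhile (fun y => decide (y = 0) == decide (x = 0))) ::
      pyGroupBy (t.dropWhile (fun y => decide (y = 0) == decide (x = 0)))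
termination_by xs => xs.length
decreasing_by
  simp only [List.length_cons]
  exact Nat.lt_succ_of_le (t.length_dropWhile_le _)

-- max((len of g) for (k, g) in groups if k), default=0
def calculate_max_consecutive_losses_py_alt (accuracies : List Int) : Int :=
  PySem.List.maxD
    (((pyGroupBy accuracies).filter (fun g => g.1)).map (fun g => ((g.2.length : Int))))
    (fun y => y) 0

-- ===== PRECONDITION & SPEC =====
def Spec_calculate_max_consecutive_losses_py (accuracies : List Int) (out : Int) : Prop := out = calculate_max_consecutive_losses_py_alt accuracies
instance (accuracies : List Int) (out : Int) : Decidable (Spec_calculate_max_consecutive_losses_py accuracies out) := by unfold Spec_calculate_max_consecutive_losses_py; infer_instance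

-- ===== CLAIM (what is proved, stated in full; the proofs are below) =====
def Claim_equal_calculate_max_consecutive_losses_py : Prop := ∀ (accuracies : List Int), Dom_calculate_max_consecutive_losses_py accuracies → Spec_calculate_max_consecutive_losses_py accuracies (calculate_max_consecutive_losses_py accuracies)

-- ===== LEMMAS AND PROOFS =====

-- "max zero-streak of t, with the streak currently running at c": reference value both ports equal
def hMax : Int → List Int → Int
  | _, [] => 0
  | c, x :: t => if x = 0 then max (c + 1) (hMax (c + 1) t) else hMax 0 t

theorem hMax_nonneg : ∀ (t : List Int) (c : Int), 0 ≤ hMax c t := by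
  intro t
  induction t with
  | nil => intro c; simp [hMax]
  | cons x t ih =>
    intro c
    simp only [hMax]
    split_ifs
    · have := ih (c + 1); omega
    · exact ih 0

theorem foldA (t : List Int) : ∀ (m c : Int), 0 ≤ m →
    (t.foldl (fun (st : Int × Int) acc =>
        if acc = 0 then (max st.1 (st.2 + 1), st.2 + 1) else (st.1, 0)) (m, c)).1
      = max m (hMax c t) := by
  induction t with
  | nil => intro m c hm; simp [hMax]; omega
  | cons x t ih =>
    intro m c hm
    simp only [List.foldl_cons, hMax]
    by_cases hx : x = 0
    · rw [if_pos hx, if_pos hx, ih (max m (c + 1)) (c + 1) (by omega)]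
      omega
    · rw [if_neg hx, if_neg hx]
      exact ih m 0 hm

theorem hMax_drop_nonzero : ∀ (t : List Int),
    hMax 0 (t.dropWhile (fun y => decide (y = 0) == false)) = hMax 0 t := by
  intro t
  induction t with
  | nil => rfl
  | cons y t ih =>
    by_cases hy : y = 0
    · rw [List.dropWhile_cons, if_neg (by simp [hy])]
    · rw [List.dropWhile_cons, if_pos (by simp [hy]), ih]
      simp [hMax, hy]

theorem hMax_drop_zero_const : ∀ (t : List Int) (c : Int),
    hMax c (t.dropWhile (fun y => decide (y = 0) == true))
      = hMax 0 (t.dropWhile (fun y => decide (y = 0) == true)) := by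
  intro t
  induction t with
  | nil => intro c; rfl
  | cons y t ih =>
    intro c
    by_cases hy : y = 0
    · rw [List.dropWhile_cons, if_pos (by simp [hy])]
      exact ih c
    · rw [List.dropWhile_cons, if_neg (by simp [hy])]
      simp [hMax, hy]

theorem hMax_zeros : ∀ (zs : List Int), (∀ z ∈ zs, z = 0) → ∀ (c : Int) (rest : List Int),
    max c (hMax c (zs ++ rest)) = max (c + zs.length) (hMax (c + zs.length) rest) := by
  intro zs
  induction zs with
  | nil => intro _ c rest; simp
  | cons z zs ih =>
    intro hall c rest
    have hz : z = 0 := hall z (by simp)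
    simp only [List.cons_append, hMax, hz]
    have hih := ih (fun w hw => hall w (by simp [hw])) (c + 1) rest
    have he : c + 1 + (zs.length : Int) = c + ((zs.length : Int) + 1) := by ring
    rw [he] at hih
    simp only [List.length_cons]
    push_cast
    omega

theorem foldl_max_comm : ∀ (t : List Int) (a b : Int),
    t.foldl max (max a b) = max a (t.foldl max b) := by
  intro t
  induction t with
  | nil => intro a b; simp
  | cons c t ih =>
    intro a b
    simp only [List.foldl_cons]
    rw [max_assoc, ih]

theorem maxD_int_cons (a : Int) (l : List Int) (ha : 0 ≤ a) :
    PySem.List.maxD (a :: l) (fun y => y) 0 = max a (PySem.List.maxD l (fun y => y) 0) := by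
  cases l with
  | nil =>
    have h0 : PySem.List.maxD ([] : List Int) (fun y => y) 0 = 0 := rfl
    have h1 : PySem.List.maxD [a] (fun y => y) 0 = a := by
      simp [PySem.List.maxD, PySem.List.max?_id_cons]
    rw [h0, h1]
    omega
  | cons b t =>
    simp only [PySem.List.maxD, PySem.List.max?_id_cons, Option.getD_some, List.foldl_cons]
    exact foldl_max_comm t a b

theorem alt_eq_hMax : ∀ (xs : List Int),
    calculate_max_consecutive_losses_py_alt xs = hMax 0 xs := by
  intro xs
  induction xs using pyGroupBy.induct with
  | case1 =>
    simp [calculate_max_consecutive_losses_py_alt, pyGroupBy]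
    rfl
  | case2 x t ih =>
    unfold calculate_max_consecutive_losses_py_alt at ih ⊢
    rw [pyGroupBy]
    by_cases hx : x = 0
    · have hk : decide (x = 0) = true := by simp [hx]
      simp only [hk] at ih ⊢
      rw [List.filter_cons_of_pos (by simp), List.map_cons,
        maxD_int_cons _ _ (Int.natCast_nonneg _), ih]
      have hrun : ∀ z ∈ x :: t.takeWhile (fun y => decide (y = 0) == true), z = 0 := by
        intro z hz
        rcases List.mem_cons.mp hz with h | h
        · exact h ▸ hx
        · simpa using List.mem_takeWhile_imp h
      have hsplit : x :: t
          = (x :: t.takeWhile (fun y => decide (y = 0) == true))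
            ++ t.dropWhile (fun y => decide (y = 0) == true) := by
        simp [List.takeWhile_append_dropWhile]
      have hz := hMax_zeros _ hrun 0 (t.dropWhile (fun y => decide (y = 0) == true))
      have hconst := hMax_drop_zero_const t
        ((0 : Int) + ((x :: t.takeWhile (fun y => decide (y = 0) == true)).length : Int))
      rw [hconst] at hz
      have hnn := hMax_nonneg ((x :: t.takeWhile (fun y => decide (y = 0) == true))
        ++ t.dropWhile (fun y => decide (y = 0) == true)) 0
      have hproj : ((true, x :: t.takeWhile (fun y => decide (y = 0) == true)).2)
          = x :: t.takeWhile (fun y => decide (y = 0) == true) := rfl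
      rw [hproj]
      conv_rhs => rw [hsplit]
      omega
    · have hk : decide (x = 0) = false := by simp [hx]
      simp only [hk] at ih ⊢
      rw [List.filter_cons_of_neg (by simp), ih, hMax_drop_nonzero t]
      simp [hMax, hx]

-- ===== VERDICT (by name: the statement is the Claim_ definition above) =====
theorem calculate_max_consecutive_losses_py_spec : Claim_equal_calculate_max_consecutive_losses_py := by
  intro xs _
  unfold Spec_calculate_max_consecutive_losses_py
  rw [alt_eq_hMax]
  unfold calculate_max_consecutive_losses_py
  by_cases hxs : xs = []
  · subst hxs; rfl
  · rw [if_neg hxs, foldA xs 0 0 le_rfl]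
    have := hMax_nonneg xs 0
    omega
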